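-- pv_equiv track=rewrite | github.com/BFCmath/ExcelChatbot_VDT | web/backend/core/extract_df.py | parse_row_paths
-- ===== SOURCE A (Python) =====
-- def parse_row_paths(row_selection):
--     """
--     Parse hierarchical row selection into individual paths.
--
--     Args:
--         row_selection: String with hierarchical row structure
--
--     Returns:
--         list: List of dictionaries, each representing a path
--     """
--     if not row_selection.strip():
--         return []
--
--     lines = row_selection.strip().split('\n')
--     paths = []
--     current_path = {}
--
--     for line in lines:
--         if not line.strip():
--             continue
--
--         # Count indentation level
--         indent_level = (len(line) - len(line.lstrip())) // 4
--
--         # Parse feature: value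
--         if ':' in line:
--             feature, value = line.strip().split(':', 1)
--             feature = feature.strip()
--             value = value.strip()
--
--             # If this is a top-level feature (indent 0), start a new path
--             if indent_level == 0:
--                 if current_path:  # Save previous path
--                     paths.append(current_path.copy())
--                 current_path = {feature: value}
--             else:
--                 # Add to current path
--                 current_path[feature] = value
--
--     # Don't forget the last path
--     if current_path:
--         paths.append(current_path)
--
--     return paths
-- ===== SOURCE B (Python) =====
-- def parse_row_paths(row_selection):
--     """Two-phase rewrite: extract (indent, feature, value) items, segment them
--     into groups at indent-0 items, then build one dict per group."""
--     text = row_selection.strip()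
--     if not text:
--         return []
--
--     items = []
--     for line in text.split('\n'):
--         if ':' in line:
--             feature, value = line.strip().split(':', 1)
--             indent = (len(line) - len(line.lstrip())) // 4
--             items.append((indent, feature.strip(), value.strip()))
--
--     groups = []
--     i = 0
--     n = len(items)
--     while i < n:
--         j = i + 1
--         while j < n and items[j][0] != 0:
--             j += 1
--         groups.append(items[i:j])
--         i = j
--
--     return [{f: v for _, f, v in g} for g in groups]
-- ===== Notes on version B (the rewrite author's own statement) =====
-- stated objective: alternative
-- what changed: A's single interleaved loop that flushes and rebuilds a current dict is replaced by three separate passes: extract (indent, feature, value) items from colon lines, segment the item list into groups starting at each indent-0 item, then build one dict per group with a comprehension.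
import Mathlib
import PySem

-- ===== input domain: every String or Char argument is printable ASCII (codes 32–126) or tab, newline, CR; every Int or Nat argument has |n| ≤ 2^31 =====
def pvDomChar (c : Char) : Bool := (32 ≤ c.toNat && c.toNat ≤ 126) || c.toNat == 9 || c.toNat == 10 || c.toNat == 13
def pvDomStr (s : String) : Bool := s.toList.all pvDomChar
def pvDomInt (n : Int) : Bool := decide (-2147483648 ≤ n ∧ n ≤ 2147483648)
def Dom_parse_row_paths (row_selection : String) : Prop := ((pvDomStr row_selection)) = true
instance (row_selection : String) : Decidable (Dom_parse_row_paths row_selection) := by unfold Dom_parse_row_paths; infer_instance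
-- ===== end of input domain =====

-- B replaces A's interleaved flush-and-build loop by three passes (extract items, segment at indent-0, build one dict per group); objective: alternative decomposition, same cost.

-- ===== PORT A =====
-- shared by both ports: both Pythons contain the identical statements
--   feature, value = line.strip().split(':', 1)   and   indent = (len(line) - len(line.lstrip())) // 4
-- splitMax? with ':' present in the line yields exactly [feature, value]; the getD defaults are never hit on such lines.
def pvParseLine (line : String) : Int × String × String :=
  let indent := PySem.Int.floordiv (PySem.Str.len line - PySem.Str.len (PySem.Str.lstrip line)) 4
  let parts := (PySem.Str.splitMax? (PySem.Str.strip line) ":" 1).getD []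
  (indent, PySem.Str.strip (parts.getD 0 ""), PySem.Str.strip (parts.getD 1 ""))

-- A's loop body on a colon line: flush current path at indent 0, else extend it
def pvStepI (st : List (PySem.Dict String String) × PySem.Dict String String)
    (x : Int × String × String) :
    List (PySem.Dict String String) × PySem.Dict String String :=
  if x.1 == 0 then
    (if st.2.items = [] then st.1 else st.1 ++ [st.2], PySem.Dict.empty.insert x.2.1 x.2.2)
  else
    (st.1, st.2.insert x.2.1 x.2.2)

-- A's loop body: skip blank lines, skip colon-less lines
def pvStepA (st : List (PySem.Dict String String) × PySem.Dict String String)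
    (line : String) :
    List (PySem.Dict String String) × PySem.Dict String String :=
  if PySem.Str.strip line = "" then st
  else if PySem.Str.isIn ":" line then pvStepI st (pvParseLine line)
  else st

def parse_row_paths (row_selection : String) : List (List (String × String)) :=
  if PySem.Str.strip row_selection = "" then []
  else
    let lines := (PySem.Str.split? (PySem.Str.strip row_selection) "\n").getD []  -- sep "\n" ≠ "": exact
    let st := lines.foldl pvStepA ([], PySem.Dict.empty)
    (if st.2.items = [] then st.1 else st.1 ++ [st.2]).map PySem.Dict.items

-- ===== PORT B =====
-- pass 1: items = [(indent, feature, value) for colon lines]  (python for-loop appending)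
def pvItemsB (lines : List String) : List (Int × String × String) :=
  lines.foldl (fun acc line =>
    if PySem.Str.isIn ":" line then acc ++ [pvParseLine line] else acc) []

-- pass 2: the index/while segmentation loop — group = items[i:j] with j the next indent-0 index
def pvGroupsB : List (Int × String × String) → List (List (Int × String × String))
  | [] => []
  | it :: rest =>
      (it :: rest.takeWhile (fun x => x.1 != 0)) :: pvGroupsB (rest.dropWhile (fun x => x.1 != 0))
termination_by l => l.length
decreasing_by
  have := List.length_dropWhile_le (fun x : Int × String × String => x.1 != 0) rest
  simp only [List.length_cons]; omega

-- pass 3: one dict comprehension per group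
def pvBuildB (g : List (Int × String × String)) : List (String × String) :=
  (g.foldl (fun d x => d.insert x.2.1 x.2.2) PySem.Dict.empty).items

def parse_row_paths_alt (row_selection : String) : List (List (String × String)) :=
  if PySem.Str.strip row_selection = "" then []
  else
    (pvGroupsB (pvItemsB ((PySem.Str.split? (PySem.Str.strip row_selection) "\n").getD []))).map pvBuildB

-- ===== PRECONDITION & SPEC =====
def Spec_parse_row_paths (row_selection : String) (out : List (List (String × String))) : Prop := out = parse_row_paths_alt row_selection
instance (row_selection : String) (out : List (List (String × String))) : Decidable (Spec_parse_row_paths row_selection out) := by unfold Spec_parse_row_paths; infer_instance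

-- ===== CLAIM (what is proved, stated in full; the proofs are below) =====
def Claim_equal_parse_row_paths : Prop := ∀ (row_selection : String), Dom_parse_row_paths row_selection → Spec_parse_row_paths row_selection (parse_row_paths row_selection)

-- ===== LEMMAS AND PROOFS =====

-- a dict an insert was performed on is non-empty (Python's `if current_path:` is then True)
theorem pv_insert_items_ne (d : PySem.Dict String String) (k : String) (v : String) :
    (d.insert k v).items ≠ [] := by
  rw [PySem.Dict.items_insert]
  by_cases h : d.items = [] <;> split <;> simp_all [PySem.Dict.contains]

-- a line that contains ':' does not strip to the empty string
theorem pv_colon_strip_ne (l : String) (h : PySem.Str.isIn ":" l = true) :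
    PySem.Str.strip l ≠ "" := by
  intro hz
  have hmem : ':' ∈ l.toList := by
    have := (PySem.Str.isIn_iff_infix (sub := ":") (s := l)).1 h
    rcases this with ⟨p, q, hp⟩
    have : ':' ∈ p ++ ":".toList ++ q := by simp
    rw [hp] at this; exact this
  have hall : ∀ c ∈ l.toList, PySem.Chars.isspace c = true := by
    have hnil : PySem.Chars.strip l.toList = [] := by
      have := congrArg String.toList hz
      simpa using this
    unfold PySem.Chars.strip PySem.Chars.rstrip PySem.Chars.lstrip at hnil
    rw [List.reverse_eq_nil_iff, List.dropWhile_eq_nil_iff] at hnil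
    intro c hc
    rw [← List.takeWhile_append_dropWhile (p := PySem.Chars.isspace) (l := l.toList)] at hc
    rcases List.mem_append.1 hc with h1 | h2
    · exact List.mem_takeWhile_imp h1
    · exact hnil c (List.mem_reverse.2 h2)
  have := hall ':' hmem
  simp [PySem.Chars.isspace] at this

-- A's line loop = A's item loop over the extracted colon items
theorem pv_foldA_extract (lines : List String)
    (st : List (PySem.Dict String String) × PySem.Dict String String) :
    lines.foldl pvStepA st =
      ((lines.filter (fun l => PySem.Str.isIn ":" l)).map pvParseLine).foldl pvStepI st := by
  induction lines generalizing st with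
  | nil => rfl
  | cons l rest ih =>
      by_cases h : PySem.Str.isIn ":" l = true
      · have h' : PySem.Chars.isIn [':'] l.toList = true := by
          simpa [PySem.Str.isIn] using h
        have hs := pv_colon_strip_ne l h
        simp [pvStepA, h', hs, ih]
      · have h' : PySem.Chars.isIn [':'] l.toList = false := by
          simpa [PySem.Str.isIn] using eq_false_of_ne_true h
        have hst : pvStepA st l = st := by
          unfold pvStepA; split
          · rfl
          · simp
        simp [List.foldl_cons, hst, h', ih]

-- B's extraction loop builds the same item list
theorem pv_itemsB_eq (lines : List String) :
    pvItemsB lines = (lines.filter (fun l => PySem.Str.isIn ":" l)).map pvParseLine := by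
  unfold pvItemsB
  rw [PySem.List.foldl_append_if (fun l => PySem.Str.isIn ":" l) pvParseLine lines []]
  simp

-- dict built from a whole group, and A's flush
def pvBuildD (g : List (Int × String × String)) : PySem.Dict String String :=
  g.foldl (fun d x => d.insert x.2.1 x.2.2) PySem.Dict.empty

def pvFinal (st : List (PySem.Dict String String) × PySem.Dict String String) :
    List (PySem.Dict String String) :=
  if st.2.items = [] then st.1 else st.1 ++ [st.2]

-- main invariant: with a non-empty open path, A's item loop produces exactly the
-- flushed paths plus the dicts of B's remaining groups
theorem pv_main (items : List (Int × String × String))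
    (paths : List (PySem.Dict String String)) (cur : PySem.Dict String String)
    (hc : cur.items ≠ []) :
    pvFinal (items.foldl pvStepI (paths, cur)) =
      paths ++ ((items.takeWhile (fun x => x.1 != 0)).foldl
          (fun d x => d.insert x.2.1 x.2.2) cur)
        :: (pvGroupsB (items.dropWhile (fun x => x.1 != 0))).map pvBuildD := by
  induction items generalizing paths cur with
  | nil => simp [pvFinal, hc, pvGroupsB]
  | cons it rest ih =>
      by_cases h : it.1 = 0
      · have hstep : pvStepI (paths, cur) it =
            (paths ++ [cur], PySem.Dict.empty.insert it.2.1 it.2.2) := by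
          simp [pvStepI, h, hc]
        rw [List.foldl_cons, hstep, ih _ _ (pv_insert_items_ne _ _ _)]
        simp [h, pvGroupsB, pvBuildD]
      · have hstep : pvStepI (paths, cur) it = (paths, cur.insert it.2.1 it.2.2) := by
          simp [pvStepI, h]
        rw [List.foldl_cons, hstep, ih _ _ (pv_insert_items_ne _ _ _)]
        simp [h]

-- starting from the empty state: A's item loop = B's grouped dicts
theorem pv_top (items : List (Int × String × String)) :
    pvFinal (items.foldl pvStepI ([], PySem.Dict.empty)) = (pvGroupsB items).map pvBuildD := by
  cases items with
  | nil => simp [pvFinal, PySem.Dict.empty, pvGroupsB]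
  | cons it rest =>
      have hstep : pvStepI ([], PySem.Dict.empty) it =
          ([], PySem.Dict.empty.insert it.2.1 it.2.2) := by
        by_cases h : it.1 = 0 <;> simp [pvStepI, h, PySem.Dict.empty]
      rw [List.foldl_cons, hstep, pv_main _ _ _ (pv_insert_items_ne _ _ _)]
      simp [pvGroupsB, pvBuildD]

-- ===== VERDICT (by name: the statement is the Claim_ definition above) =====
theorem parse_row_paths_spec : Claim_equal_parse_row_paths := by
  intro s _
  unfold Spec_parse_row_paths parse_row_paths parse_row_paths_alt
  by_cases h : PySem.Str.strip s = ""
  · simp [h]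
  · simp only [h, ite_false]
    rw [pv_foldA_extract, ← pv_itemsB_eq]
    have := pv_top (pvItemsB ((PySem.Str.split? (PySem.Str.strip s) "\n").getD []))
    unfold pvFinal at this
    rw [this]
    simp [pvBuildB, pvBuildD]
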